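-- pv_equiv track=rewrite | github.com/microsoft/ExperimentTools | xtlib/qfe.py | replace_curlies_with_quotes
-- ===== SOURCE A (Python) =====
-- def replace_curlies_with_quotes(text):
--     '''
--     replace any {} that appear outside of quotes with single quotes.
--     '''
--
--     new_text = ""
--     protector = None
--
--     for ch in text:
--         if ch == protector:
--
--             # end of a quoted string
--             protector = None
--             if ch == "}":
--                 ch = "'"
--         elif not protector:
--
--             # outside of a quoted string
--             if ch in ["'", '"', "{"]:
--                 # start of a quoted string
--                 if ch == "{":
--                     protector = "}"
--                     ch = "'"
--                 else:
--                     protector = ch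
--
--         new_text += ch
--
--     return new_text
-- ===== SOURCE B (Python) =====
-- def replace_curlies_with_quotes(text):
--     '''
--     replace any {} that appear outside of quotes with single quotes.
--     '''
--     out = []
--     i = 0
--     n = len(text)
--     while i < n:
--         ch = text[i]
--         if ch == '{':
--             out.append("'")
--             i += 1
--             while i < n and text[i] != '}':
--                 out.append(text[i])
--                 i += 1
--             if i < n:
--                 out.append("'")
--                 i += 1
--         elif ch == "'" or ch == '"':
--             out.append(ch)
--             i += 1
--             while i < n and text[i] != ch:
--                 out.append(text[i])
--                 i += 1
--             if i < n:
--                 out.append(ch)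
--                 i += 1
--         else:
--             out.append(ch)
--             i += 1
--     return ''.join(out)
-- ===== Notes on version B (the rewrite author's own statement) =====
-- stated objective: alternative
-- what changed: Replaces the flat character-by-character state machine (a 'protector' variable threaded through one for-loop) with an index-driven outer loop that, on meeting an opening brace or quote, runs an inner copy-until-closer loop, collecting chars in a list joined at the end.
import Mathlib
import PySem

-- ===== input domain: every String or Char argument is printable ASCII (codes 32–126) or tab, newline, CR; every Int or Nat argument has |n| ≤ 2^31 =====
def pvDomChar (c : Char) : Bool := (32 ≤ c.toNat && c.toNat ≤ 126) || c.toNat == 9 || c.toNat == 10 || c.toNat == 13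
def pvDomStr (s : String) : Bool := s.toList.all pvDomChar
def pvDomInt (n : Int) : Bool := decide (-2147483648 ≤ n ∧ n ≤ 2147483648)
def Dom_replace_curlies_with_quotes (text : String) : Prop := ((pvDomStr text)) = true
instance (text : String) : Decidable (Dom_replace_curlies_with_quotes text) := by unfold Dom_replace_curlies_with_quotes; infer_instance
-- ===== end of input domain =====

-- B replaces A's flat protector-state machine with an outer/inner mutual recursion
-- (copy-until-closer regions), a genuinely different decomposition of the same scan.


-- ===== PORT A =====
-- A's loop body: state = (accumulated chars, protector); branch order as in Python.
def qfeStep (st : List Char × Option Char) (ch : Char) : List Char × Option Char :=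
  let acc := st.1
  let protector := st.2
  if some ch = protector then
    -- end of a quoted string
    let ch := if ch = '}' then '\'' else ch
    (acc ++ [ch], none)
  else if protector = none then
    -- outside of a quoted string
    if ch = '\'' ∨ ch = '"' ∨ ch = '{' then
      if ch = '{' then (acc ++ ['\''], some '}')
      else (acc ++ [ch], some ch)
    else (acc ++ [ch], none)
  else
    (acc ++ [ch], protector)

def replace_curlies_with_quotes (text : String) : String :=
  String.mk (text.toList.foldl qfeStep ([], none)).1

-- ===== PORT B =====
-- outer loop over the chars; inner loop copies until `closer`, emitting `emit` for it.
mutual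
def qfeAltOuter : List Char → List Char
  | [] => []
  | c :: rest =>
    if c = '{' then '\'' :: qfeAltInner '}' '\'' rest
    else if c = '\'' ∨ c = '"' then c :: qfeAltInner c c rest
    else c :: qfeAltOuter rest
def qfeAltInner (closer emit : Char) : List Char → List Char
  | [] => []
  | c :: rest =>
    if c = closer then emit :: qfeAltOuter rest
    else c :: qfeAltInner closer emit rest
end

def replace_curlies_with_quotes_alt (text : String) : String :=
  String.mk (qfeAltOuter text.toList)

-- ===== PRECONDITION & SPEC =====
def Spec_replace_curlies_with_quotes (text : String) (out : String) : Prop := out = replace_curlies_with_quotes_alt text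
instance (text : String) (out : String) : Decidable (Spec_replace_curlies_with_quotes text out) := by unfold Spec_replace_curlies_with_quotes; infer_instance

-- ===== CLAIM (what is proved, stated in full; the proofs are below) =====
def Claim_equal_replace_curlies_with_quotes : Prop := ∀ (text : String), Dom_replace_curlies_with_quotes text → Spec_replace_curlies_with_quotes text (replace_curlies_with_quotes text)

-- ===== LEMMAS AND PROOFS =====

-- A's protector emits '\'' when it is '}', otherwise itself.
def qfeEmit (p : Char) : Char := if p = '}' then '\'' else p

-- Joint loop invariant: A's fold from state (acc, none) / (acc, some p)
-- produces acc ++ qfeAltOuter l / acc ++ qfeAltInner p (qfeEmit p) l.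
theorem qfe_fold_inv (l : List Char) :
    (∀ acc : List Char, (l.foldl qfeStep (acc, none)).1 = acc ++ qfeAltOuter l) ∧
    (∀ (acc : List Char) (p : Char),
      (l.foldl qfeStep (acc, some p)).1 = acc ++ qfeAltInner p (qfeEmit p) l) := by
  induction l with
  | nil => simp [qfeAltOuter, qfeAltInner]
  | cons c rest ih =>
    obtain ⟨ihO, ihI⟩ := ih
    constructor
    · intro acc
      by_cases hc : c = '{'
      · subst hc
        simp [List.foldl, qfeStep, qfeAltOuter, ihI, qfeEmit]
      · by_cases hq : c = '\'' ∨ c = '"'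
        · have h1 : (if c = '}' then '\'' else c) = c := by
            rcases hq with h | h <;> subst h <;> decide
          simp [List.foldl, qfeStep, qfeAltOuter, hc, hq, ihI, qfeEmit]
          rcases hq with h | h <;> subst h <;> simp
        · simp [List.foldl, qfeStep, qfeAltOuter, hc, hq, ihO]
    · intro acc p
      by_cases hc : c = p
      · subst hc
        simp [List.foldl, qfeStep, qfeAltInner, ihO, qfeEmit]
      · have hne : ¬ (some c = some p) := by simpa using hc
        simp [List.foldl, qfeStep, qfeAltInner, hc, hne, ihI]

-- ===== VERDICT (by name: the statement is the Claim_ definition above) =====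
theorem replace_curlies_with_quotes_spec : Claim_equal_replace_curlies_with_quotes := by
  intro text _
  unfold Spec_replace_curlies_with_quotes replace_curlies_with_quotes replace_curlies_with_quotes_alt
  rw [(qfe_fold_inv text.toList).1 []]
  rfl
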